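-- pv_equiv track=rewrite | github.com/imgwho/cwtwb | src/cwtwb/authoring_run.py | _suggest_filters
-- ===== SOURCE A (Python) =====
-- def _choose_geo(fields: dict[str, list[str]], fallback: str = "State/Province") -> str:
--     geo_fields = fields.get("geo_fields", [])
--     if not geo_fields:
--         return fallback
--
--     preferred_order = [
--         "region",
--         "state/province",
--         "state",
--         "province",
--         "country/region",
--         "country",
--         "city",
--         "postal code",
--         "zip code",
--         "zipcode",
--         "latitude",
--         "longitude",
--         "lat",
--         "lon",
--     ]
--     ranked = {
--         name: index
--         for index, name in enumerate(preferred_order)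
--     }
--
--     def _rank(field_name: str) -> tuple[int, str]:
--         normalized = " ".join(
--             field_name.casefold().replace("_", " ").replace("-", " ").split()
--         )
--         return (ranked.get(normalized, len(preferred_order)), field_name)
--
--     return sorted(geo_fields, key=_rank)[0]
--
-- def _choose_date(fields: dict[str, list[str]], fallback: str = "Order Date") -> str:
--     return fields["date_fields"][0] if fields["date_fields"] else fallback
--
-- def _unique_strings(values: list[str]) -> list[str]:
--     seen: set[str] = set()
--     result: list[str] = []
--     for value in values:
--         if value in ("", None):
--             continue
--         cleaned = str(value).strip()
--         if cleaned and cleaned not in seen: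
--             seen.add(cleaned)
--             result.append(cleaned)
--     return result
--
-- def _choose_named_field(fields: list[str], preferred_names: list[str]) -> str:
--     normalized_map = {
--         " ".join(field.casefold().replace("_", " ").replace("-", " ").split()): field
--         for field in fields
--     }
--     for preferred in preferred_names:
--         normalized = " ".join(preferred.casefold().replace("_", " ").replace("-", " ").split())
--         if normalized in normalized_map:
--             return normalized_map[normalized]
--     return ""
--
-- def _suggest_filters(field_candidates: dict[str, list[str]]) -> list[str]:
--     dimensions = field_candidates.get("dimensions", [])
--     filters: list[str] = []
--     date_field = _choose_date(field_candidates, "")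
--     geo_field = _choose_geo(field_candidates, "")
--     if date_field:
--         filters.append(date_field)
--     if geo_field:
--         filters.append(geo_field)
--     for preferred in ("Category", "Sub-Category", "Segment"):
--         chosen = _choose_named_field(dimensions, [preferred])
--         if chosen:
--             filters.append(chosen)
--     if not filters:
--         filters.extend(dimensions[:3])
--     return _unique_strings(filters)
-- ===== SOURCE B (Python) =====
-- def _norm(name):
--     return " ".join(name.casefold().replace("_", " ").replace("-", " ").split())
--
--
-- _GEO_PREFERENCE = [
--     "region", "state/province", "state", "province", "country/region",
--     "country", "city", "postal code", "zip code", "zipcode",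
--     "latitude", "longitude", "lat", "lon",
-- ]
--
--
-- def _best_geo(geo_fields):
--     for want in _GEO_PREFERENCE:
--         matches = [f for f in geo_fields if _norm(f) == want]
--         if matches:
--             return min(matches)
--     return min(geo_fields)
--
--
-- def _last_with_norm(fields, target):
--     for f in reversed(fields):
--         if _norm(f) == target:
--             return f
--     return None
--
--
-- def _suggest_filters(field_candidates):
--     dims = field_candidates.get("dimensions", [])
--     date_fields = field_candidates["date_fields"]
--     geo_fields = field_candidates.get("geo_fields", [])
--     raw = []
--     if date_fields and date_fields[0]:
--         raw.append(date_fields[0])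
--     if geo_fields:
--         g = _best_geo(geo_fields)
--         if g:
--             raw.append(g)
--     for target in ("category", "sub category", "segment"):
--         f = _last_with_norm(dims, target)
--         if f is not None:
--             raw.append(f)
--     if not raw:
--         raw = dims[:3]
--     return [s for s in dict.fromkeys(v.strip() for v in raw) if s]
-- ===== Notes on version B (the rewrite author's own statement) =====
-- stated objective: alternative
-- what changed: B replaces the full sort of geo_fields by a rank-order scan of the preference list (min of the matching fields, min overall as fallback), replaces the per-call normalized dict of _choose_named_field by a first-match scan over the reversed dimension list, and replaces the seen-set accumulator loop of _unique_strings by dict.fromkeys ordered dedup of the stripped values.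
-- outside the precondition, e.g. on _suggest_filters({}): A raises KeyError, B raises KeyError
import Mathlib
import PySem

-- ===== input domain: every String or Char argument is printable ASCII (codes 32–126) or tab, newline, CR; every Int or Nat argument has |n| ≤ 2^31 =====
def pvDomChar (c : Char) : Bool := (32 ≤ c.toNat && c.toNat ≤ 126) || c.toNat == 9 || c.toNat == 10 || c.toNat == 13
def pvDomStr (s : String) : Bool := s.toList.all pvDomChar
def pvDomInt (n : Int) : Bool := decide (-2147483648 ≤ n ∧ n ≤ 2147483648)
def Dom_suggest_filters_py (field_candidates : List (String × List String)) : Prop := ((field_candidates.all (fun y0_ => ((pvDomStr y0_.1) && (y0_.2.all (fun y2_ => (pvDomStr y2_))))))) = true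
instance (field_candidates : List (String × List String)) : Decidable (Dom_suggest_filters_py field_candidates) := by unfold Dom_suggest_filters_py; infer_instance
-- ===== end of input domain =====

-- B avoids the full sort of geo_fields (scans the preference list instead) and the per-call
-- normalized dict of A, using a reversed scan and an ordered dedup; objective: alternative
-- (similar cost, different algorithm).

-- " ".join(name.casefold().replace("_"," ").replace("-"," ").split()); casefold = lower on the ASCII domain
def pyNorm (s : String) : String :=
  PySem.Str.join " " (PySem.Str.split₀ (PySem.Str.replace (PySem.Str.replace (PySem.Str.lower s) "_" " ") "-" " "))

-- ===== PORT A =====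
def preferredOrderA : List String :=
  ["region", "state/province", "state", "province", "country/region", "country", "city",
   "postal code", "zip code", "zipcode", "latitude", "longitude", "lat", "lon"]

-- ranked = {name: index for index, name in enumerate(preferred_order)}
def rankedA : PySem.Dict String Int :=
  (PySem.List.enumerate preferredOrderA).foldl (fun d p => d.insert p.2 p.1) PySem.Dict.empty

-- _rank's first component: ranked.get(normalized, len(preferred_order))
def rankA (field_name : String) : Int := rankedA.getD (pyNorm field_name) (preferredOrderA.length : Int)

-- _choose_geo; 'sorted(geo_fields, key=_rank)[0]' — the [] branch of the match is unreachable (sorted of a nonempty list)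
def chooseGeoA (fields : PySem.Dict String (List String)) (fallback : String) : String :=
  let geo_fields := fields.getD "geo_fields" []
  if geo_fields = [] then fallback
  else
    match PySem.List.sorted2 geo_fields rankA (fun f => f) with
    | [] => fallback
    | m :: _ => m

-- _choose_date; on a missing "date_fields" key Python raises KeyError (excluded by Pre_): the none branch is unreachable under Pre_
def chooseDateA (fields : PySem.Dict String (List String)) (fallback : String) : String :=
  match fields.get? "date_fields" with
  | none => fallback
  | some l => match l with
    | [] => fallback
    | x :: _ => x

-- the 'for preferred in preferred_names: if normalized in map: return …' loop of _choose_named_field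
def chooseNamedAux (normalized_map : PySem.Dict String String) : List String → String
  | [] => ""
  | p :: ps =>
    match normalized_map.get? (pyNorm p) with
    | some v => v
    | none => chooseNamedAux normalized_map ps

-- _choose_named_field
def chooseNamedA (fields : List String) (preferred_names : List String) : String :=
  chooseNamedAux (fields.foldl (fun d f => d.insert (pyNorm f) f) PySem.Dict.empty) preferred_names

-- _unique_strings: a loop over values with state (seen, result)
def uniqueStringsA (values : List String) : List String :=
  (values.foldl
    (fun (st : PySem.Set String × List String) v =>
      if v = "" then st
      else
        let cleaned := PySem.Str.strip v
        if cleaned ≠ "" ∧ PySem.Set.contains st.1 cleaned = false then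
          (PySem.Set.add st.1 cleaned, st.2 ++ [cleaned])
        else st)
    (PySem.Set.empty, [])).2

def suggest_filters_py (field_candidates : List (String × List String)) : List String :=
  let fields := PySem.Dict.ofList field_candidates
  let dimensions := fields.getD "dimensions" []
  let date_field := chooseDateA fields ""
  let geo_field := chooseGeoA fields ""
  let filters : List String := []
  let filters := if date_field ≠ "" then filters ++ [date_field] else filters
  let filters := if geo_field ≠ "" then filters ++ [geo_field] else filters
  let filters := ["Category", "Sub-Category", "Segment"].foldl
    (fun acc p =>
      let chosen := chooseNamedA dimensions [p]
      if chosen ≠ "" then acc ++ [chosen] else acc) filters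
  let filters := if filters = [] then filters ++ PySem.List.slice dimensions none (some 3) else filters
  uniqueStringsA filters

-- ===== PORT B =====
def geoPreference : List String :=
  ["region", "state/province", "state", "province", "country/region", "country", "city",
   "postal code", "zip code", "zipcode", "latitude", "longitude", "lat", "lon"]

-- _best_geo: walk the preference list; first preference with matches wins, min() breaks ties;
-- min() of a nonempty list is always some, so .getD "" is a totality guard only
def bestGeoAux : List String → List String → String
  | [], geo_fields => (PySem.List.min? geo_fields (fun x => x)).getD ""
  | w :: ws, geo_fields =>
    match geo_fields.filter (fun f => pyNorm f == w) with
    | [] => bestGeoAux ws geo_fields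
    | m :: ms => (PySem.List.min? (m :: ms) (fun x => x)).getD ""

def bestGeo (geo_fields : List String) : String := bestGeoAux geoPreference geo_fields

-- _last_with_norm: first match in reversed(fields)
def lastWithNorm (fields : List String) (target : String) : Option String :=
  fields.reverse.find? (fun f => pyNorm f == target)

def suggest_filters_py_alt (field_candidates : List (String × List String)) : List String :=
  let fields := PySem.Dict.ofList field_candidates
  let dims := fields.getD "dimensions" []
  -- field_candidates["date_fields"]: a missing key raises KeyError (excluded by Pre_); [] stands for that unreachable branch
  let date_fields := fields.getD "date_fields" []
  let geo_fields := fields.getD "geo_fields" []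
  let raw : List String := []
  let raw := match date_fields with
    | [] => raw
    | x :: _ => if x ≠ "" then raw ++ [x] else raw
  let raw := if geo_fields = [] then raw
    else
      let g := bestGeo geo_fields
      if g ≠ "" then raw ++ [g] else raw
  let raw := ["category", "sub category", "segment"].foldl
    (fun acc t =>
      match lastWithNorm dims t with
      | some f => acc ++ [f]
      | none => acc) raw
  let raw := if raw = [] then PySem.List.slice dims none (some 3) else raw
  (PySem.List.dedup (raw.map PySem.Str.strip)).filter (fun s => s != "")

-- ===== PRECONDITION & SPEC =====
-- A subscripts field_candidates["date_fields"] and raises KeyError when the key is absent;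
-- Pre_ excludes exactly those inputs.
def Pre_suggest_filters_py (field_candidates : List (String × List String)) : Prop :=
  "date_fields" ∈ field_candidates.map (·.1)
instance (field_candidates : List (String × List String)) : Decidable (Pre_suggest_filters_py field_candidates) := by unfold Pre_suggest_filters_py; infer_instance

def pvWitness_suggest_filters_py : (List (String × List String)) :=
  [("date_fields", ["Order Date"]), ("dimensions", ["Category", "Region"])]

def Spec_suggest_filters_py (field_candidates : List (String × List String)) (out : List String) : Prop := out = suggest_filters_py_alt field_candidates
instance (field_candidates : List (String × List String)) (out : List String) : Decidable (Spec_suggest_filters_py field_candidates out) := by unfold Spec_suggest_filters_py; infer_instance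

-- ===== CLAIM (what is proved, stated in full; the proofs are below) =====
def Claim_equal_suggest_filters_py : Prop := ∀ (field_candidates : List (String × List String)), Dom_suggest_filters_py field_candidates → Pre_suggest_filters_py field_candidates → Spec_suggest_filters_py field_candidates (suggest_filters_py field_candidates)


-- ===== LEMMAS AND PROOFS =====

-- the canonical rank of a normalized name: its index in the preference list, 14 when absent
def rankSpec (s : String) : Int :=
  if "region" = s then 0 else if "state/province" = s then 1 else if "state" = s then 2
  else if "province" = s then 3 else if "country/region" = s then 4 else if "country" = s then 5
  else if "city" = s then 6 else if "postal code" = s then 7 else if "zip code" = s then 8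
  else if "zipcode" = s then 9 else if "latitude" = s then 10 else if "longitude" = s then 11
  else if "lat" = s then 12 else if "lon" = s then 13 else 14

-- rank of a normalized name relative to a suffix of the preference list
def rankL : List String → String → Int
  | [], _ => 0
  | w :: ws, s => if w = s then 0 else rankL ws s + 1

-- the strict order A sorts geo_fields by: rank first, original name second
def LtG (a b : String) : Prop :=
  rankSpec (pyNorm a) < rankSpec (pyNorm b) ∨
    (rankSpec (pyNorm a) = rankSpec (pyNorm b) ∧ a < b)

lemma rankedA_eq : rankedA = PySem.Dict.mk
    [("region", 0), ("state/province", 1), ("state", 2), ("province", 3), ("country/region", 4),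
     ("country", 5), ("city", 6), ("postal code", 7), ("zip code", 8), ("zipcode", 9),
     ("latitude", 10), ("longitude", 11), ("lat", 12), ("lon", 13)] := by decide

set_option maxHeartbeats 1000000 in
lemma rankA_eq (f : String) : rankA f = rankSpec (pyNorm f) := by
  unfold rankA
  rw [rankedA_eq]
  generalize pyNorm f = s
  have hl : (preferredOrderA.length : Int) = 14 := by decide
  rw [hl, PySem.Dict.getD_eq_get?_getD]
  simp only [PySem.Dict.get?_mk_cons, beq_iff_eq]
  unfold rankSpec
  by_cases h0 : "region" = s
  · rw [if_pos h0, if_pos h0]; rfl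
  · rw [if_neg h0, if_neg h0]
    by_cases h1 : "state/province" = s
    · rw [if_pos h1, if_pos h1]; rfl
    · rw [if_neg h1, if_neg h1]
      by_cases h2 : "state" = s
      · rw [if_pos h2, if_pos h2]; rfl
      · rw [if_neg h2, if_neg h2]
        by_cases h3 : "province" = s
        · rw [if_pos h3, if_pos h3]; rfl
        · rw [if_neg h3, if_neg h3]
          by_cases h4 : "country/region" = s
          · rw [if_pos h4, if_pos h4]; rfl
          · rw [if_neg h4, if_neg h4]
            by_cases h5 : "country" = s
            · rw [if_pos h5, if_pos h5]; rfl
            · rw [if_neg h5, if_neg h5]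
              by_cases h6 : "city" = s
              · rw [if_pos h6, if_pos h6]; rfl
              · rw [if_neg h6, if_neg h6]
                by_cases h7 : "postal code" = s
                · rw [if_pos h7, if_pos h7]; rfl
                · rw [if_neg h7, if_neg h7]
                  by_cases h8 : "zip code" = s
                  · rw [if_pos h8, if_pos h8]; rfl
                  · rw [if_neg h8, if_neg h8]
                    by_cases h9 : "zipcode" = s
                    · rw [if_pos h9, if_pos h9]; rfl
                    · rw [if_neg h9, if_neg h9]
                      by_cases h10 : "latitude" = s
                      · rw [if_pos h10, if_pos h10]; rfl
                      · rw [if_neg h10, if_neg h10]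
                        by_cases h11 : "longitude" = s
                        · rw [if_pos h11, if_pos h11]; rfl
                        · rw [if_neg h11, if_neg h11]
                          by_cases h12 : "lat" = s
                          · rw [if_pos h12, if_pos h12]; rfl
                          · rw [if_neg h12, if_neg h12]
                            by_cases h13 : "lon" = s
                            · rw [if_pos h13, if_pos h13]; rfl
                            · rw [if_neg h13, if_neg h13]
                              rfl

set_option maxHeartbeats 1000000 in
lemma rankL_eq (s : String) : rankL geoPreference s = rankSpec s := by
  unfold geoPreference rankSpec
  simp only [rankL]
  by_cases h0 : "region" = s
  · rw [if_pos h0, if_pos h0 ] <;> norm_num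
  · rw [if_neg h0, if_neg h0]
    by_cases h1 : "state/province" = s
    · rw [if_pos h1, if_pos h1 ] <;> norm_num
    · rw [if_neg h1, if_neg h1]
      by_cases h2 : "state" = s
      · rw [if_pos h2, if_pos h2 ] <;> norm_num
      · rw [if_neg h2, if_neg h2]
        by_cases h3 : "province" = s
        · rw [if_pos h3, if_pos h3 ] <;> norm_num
        · rw [if_neg h3, if_neg h3]
          by_cases h4 : "country/region" = s
          · rw [if_pos h4, if_pos h4 ] <;> norm_num
          · rw [if_neg h4, if_neg h4]
            by_cases h5 : "country" = s
            · rw [if_pos h5, if_pos h5 ] <;> norm_num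
            · rw [if_neg h5, if_neg h5]
              by_cases h6 : "city" = s
              · rw [if_pos h6, if_pos h6 ] <;> norm_num
              · rw [if_neg h6, if_neg h6]
                by_cases h7 : "postal code" = s
                · rw [if_pos h7, if_pos h7 ] <;> norm_num
                · rw [if_neg h7, if_neg h7]
                  by_cases h8 : "zip code" = s
                  · rw [if_pos h8, if_pos h8 ] <;> norm_num
                  · rw [if_neg h8, if_neg h8]
                    by_cases h9 : "zipcode" = s
                    · rw [if_pos h9, if_pos h9 ] <;> norm_num
                    · rw [if_neg h9, if_neg h9]
                      by_cases h10 : "latitude" = s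
                      · rw [if_pos h10, if_pos h10 ] <;> norm_num
                      · rw [if_neg h10, if_neg h10]
                        by_cases h11 : "longitude" = s
                        · rw [if_pos h11, if_pos h11 ] <;> norm_num
                        · rw [if_neg h11, if_neg h11]
                          by_cases h12 : "lat" = s
                          · rw [if_pos h12, if_pos h12 ] <;> norm_num
                          · rw [if_neg h12, if_neg h12]
                            by_cases h13 : "lon" = s
                            · rw [if_pos h13, if_pos h13 ] <;> norm_num
                            · rw [if_neg h13, if_neg h13]
                              norm_num [rankL]

lemma rankL_nonneg (ws : List String) (s : String) : 0 ≤ rankL ws s := by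
  induction ws with
  | nil => simp [rankL]
  | cons w ws ih => simp only [rankL]; split <;> omega

lemma LtG_irrefl (a : String) : ¬ LtG a a := by
  rintro (h | ⟨-, h⟩)
  · exact lt_irrefl _ h
  · exact lt_irrefl _ h

lemma LtG_trans {a b c : String} (h1 : LtG a b) (h2 : LtG b c) : LtG a c := by
  rcases h1 with h1 | ⟨h1, h1'⟩ <;> rcases h2 with h2 | ⟨h2, h2'⟩
  · exact Or.inl (lt_trans h1 h2)
  · exact Or.inl (lt_of_lt_of_le h1 (le_of_eq h2))
  · exact Or.inl (lt_of_le_of_lt (le_of_eq h1) h2)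
  · exact Or.inr ⟨h1.trans h2, lt_trans h1' h2'⟩

lemma LtG_connected {a b : String} (h1 : ¬ LtG a b) (h2 : ¬ LtG b a) : a = b := by
  simp only [LtG, not_or, not_and] at h1 h2
  have hr : rankSpec (pyNorm a) = rankSpec (pyNorm b) := le_antisymm (not_lt.1 h2.1) (not_lt.1 h1.1)
  exact le_antisymm (not_lt.1 (h2.2 hr.symm)) (not_lt.1 (h1.2 hr))

-- sorted2's comparison is exactly LtG
lemma lt2_eq_LtG (a b : String) :
    (decide (rankA a < rankA b) || (!decide (rankA b < rankA a) && decide (a < b))) = true ↔ LtG a b := by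
  simp only [rankA_eq, Bool.or_eq_true, Bool.and_eq_true, Bool.not_eq_true', decide_eq_true_eq,
    decide_eq_false_iff_not, LtG]
  constructor
  · rintro (h | ⟨h, h'⟩)
    · exact Or.inl h
    · rcases lt_trichotomy (rankSpec (pyNorm a)) (rankSpec (pyNorm b)) with hl | he | hg
      · exact Or.inl hl
      · exact Or.inr ⟨he, h'⟩
      · exact absurd hg h
  · rintro (h | ⟨h, h'⟩)
    · exact Or.inl h
    · exact Or.inr ⟨by omega, h'⟩

lemma insertBy_min (lt : String → String → Bool)
    (hirr : ∀ a, lt a a = false)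
    (htrans : ∀ a b c, lt a b = true → lt b c = true → lt a c = true)
    (x : String) (acc : List String)
    (hacc : ∀ h, acc.head? = some h → ∀ y ∈ acc, lt y h = false) :
    ∀ h, (PySem.List.insertBy lt x acc).head? = some h →
      ∀ y ∈ PySem.List.insertBy lt x acc, lt y h = false := by
  cases acc with
  | nil =>
    intro h hh y hy
    simp [PySem.List.insertBy] at hh hy
    subst hh; subst hy; exact hirr _
  | cons a as =>
    by_cases hx : lt x a = true
    · intro h hh y hy
      simp only [PySem.List.insertBy, hx, if_pos] at hh hy
      simp only [List.head?_cons, Option.some.injEq] at hh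
      rcases List.mem_cons.1 hy with rfl | hy'
      · rw [← hh]; exact hirr _
      · by_contra hc
        have hyx : lt y h = true := by
          cases hlt : lt y h
          · exact absurd hlt hc
          · rfl
        rw [hh] at hx
        have := htrans y h a hyx hx
        have h0 := hacc a rfl y hy'
        rw [h0] at this; exact Bool.false_ne_true this
    · intro h hh y hy
      have hxf : lt x a = false := by
        cases hlt : lt x a
        · rfl
        · exact absurd hlt hx
      simp only [PySem.List.insertBy, hxf] at hh hy
      simp only [Bool.false_eq_true, if_false] at hh hy
      simp only [List.head?_cons, Option.some.injEq] at hh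
      rcases List.mem_cons.1 hy with rfl | hy'
      · rw [← hh]; exact hirr _
      · rcases (PySem.List.mem_insertBy lt x y as).1 hy' with rfl | hmem
        · rw [← hh]; exact hxf
        · rw [← hh]; exact hacc a rfl y (List.mem_cons_of_mem _ hmem)


-- head of an insertBy-fold is minimal w.r.t. an irreflexive transitive comparison
lemma head_min_insertBy (lt : String → String → Bool)
    (hirr : ∀ a, lt a a = false)
    (htrans : ∀ a b c, lt a b = true → lt b c = true → lt a c = true) :
    ∀ (xs acc : List String),
      (∀ h, acc.head? = some h → ∀ y ∈ acc, lt y h = false) →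
      ∀ h, (xs.foldl (fun l x => PySem.List.insertBy lt x l) acc).head? = some h →
        ∀ y ∈ xs.foldl (fun l x => PySem.List.insertBy lt x l) acc, lt y h = false := by
  intro xs
  induction xs with
  | nil => intro acc hacc h hh y hy; exact hacc h hh y hy
  | cons x xs ih =>
    intro acc hacc
    simp only [List.foldl_cons]
    apply ih
    exact insertBy_min lt hirr htrans x acc hacc

-- B's geo choice is minimal w.r.t. the rank relative to the remaining preferences
lemma bestGeoAux_spec (ws : List String) (geo : List String) (hg : geo ≠ []) :
    bestGeoAux ws geo ∈ geo ∧
      ∀ y ∈ geo, ¬ (rankL ws (pyNorm y) < rankL ws (pyNorm (bestGeoAux ws geo)) ∨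
        (rankL ws (pyNorm y) = rankL ws (pyNorm (bestGeoAux ws geo)) ∧ y < bestGeoAux ws geo)) := by
  induction ws with
  | nil =>
    cases hm : PySem.List.min? geo (fun x => x) with
    | none => exact absurd ((PySem.List.min?_eq_none_iff geo _).1 hm) hg
    | some m =>
      have hbest : bestGeoAux [] geo = m := by simp [bestGeoAux, hm]
      rw [hbest]
      refine ⟨PySem.List.min?_mem hm, ?_⟩
      rintro y hy (h | ⟨-, h⟩)
      · simp [rankL] at h
      · exact absurd h (not_lt.2 (PySem.List.min?_isMin hm y hy))
  | cons w ws ih =>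
    cases hf : geo.filter (fun f => pyNorm f == w) with
    | nil =>
      have hbest : bestGeoAux (w :: ws) geo = bestGeoAux ws geo := by
        simp only [bestGeoAux, hf]
      have hnotw : ∀ y ∈ geo, ¬ (w = pyNorm y) := by
        intro y hy he
        have := List.filter_eq_nil_iff.1 hf y hy
        simp [← he] at this
      rw [hbest]
      obtain ⟨hmem, hmin⟩ := ih
      refine ⟨hmem, ?_⟩
      intro y hy
      have hry : rankL (w :: ws) (pyNorm y) = rankL ws (pyNorm y) + 1 := by
        simp only [rankL, if_neg (hnotw y hy)]
      have hrm : rankL (w :: ws) (pyNorm (bestGeoAux ws geo)) = rankL ws (pyNorm (bestGeoAux ws geo)) + 1 := by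
        simp only [rankL, if_neg (hnotw _ hmem)]
      rw [hry, hrm]
      rintro (h | ⟨he, hlt⟩)
      · exact hmin y hy (Or.inl (by omega))
      · exact hmin y hy (Or.inr ⟨by omega, hlt⟩)
    | cons m0 ms =>
      have hbest : bestGeoAux (w :: ws) geo = (PySem.List.min? (m0 :: ms) (fun x => x)).getD "" := by
        simp only [bestGeoAux, hf]
      cases hm : PySem.List.min? (m0 :: ms) (fun x => x) with
      | none => simp [PySem.List.min?_eq_none_iff] at hm
      | some m =>
        rw [hbest, hm]
        simp only [Option.getD_some]
        have hmf : m ∈ geo.filter (fun f => pyNorm f == w) := by rw [hf]; exact PySem.List.min?_mem hm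
        have hmgeo : m ∈ geo := List.mem_of_mem_filter hmf
        have hmw : pyNorm m = w := by
          have := List.of_mem_filter hmf
          exact eq_of_beq this
        have hrm : rankL (w :: ws) (pyNorm m) = 0 := by
          simp only [rankL, if_pos hmw.symm]
        refine ⟨hmgeo, ?_⟩
        intro y hy
        rw [hrm]
        rintro (h | ⟨he, hlt⟩)
        · have := rankL_nonneg (w :: ws) (pyNorm y); omega
        · have hyw : w = pyNorm y := by
            by_contra hne
            have := rankL_nonneg ws (pyNorm y)
            simp only [rankL, if_neg hne] at he
            omega
          have hymem : y ∈ geo.filter (fun f => pyNorm f == w) := by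
            apply List.mem_filter.2 ⟨hy, by simp [hyw]⟩
          rw [hf] at hymem
          have := PySem.List.min?_isMin hm y hymem
          exact absurd hlt (not_lt.2 this)

-- the comparison function sorted2 uses, named
def ltg (a b : String) : Bool :=
  decide (rankA a < rankA b) || (!decide (rankA b < rankA a) && decide (a < b))

lemma ltg_iff {a b : String} : ltg a b = true ↔ LtG a b := by
  unfold ltg
  exact lt2_eq_LtG a b

-- the central geo lemma: head of A's sort = B's preference scan
set_option maxHeartbeats 1000000 in
lemma geo_head_eq (geo : List String) (hg : geo ≠ []) :
    (match PySem.List.sorted2 geo rankA (fun f => f) with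
      | [] => ""
      | m :: _ => m) = bestGeo geo := by
  have hirr : ∀ a : String, ltg a a = false := by
    intro a
    cases h : ltg a a
    · rfl
    · exact absurd (ltg_iff.1 h) (LtG_irrefl a)
  have htrans : ∀ a b c : String, ltg a b = true → ltg b c = true → ltg a c = true := by
    intro a b c h1 h2
    exact ltg_iff.2 (LtG_trans (ltg_iff.1 h1) (ltg_iff.1 h2))
  cases hs : PySem.List.sorted2 geo rankA (fun f => f) with
  | nil =>
    have := PySem.List.sorted2_perm geo rankA (fun f => f) false
    rw [hs] at this
    exact absurd this.symm.eq_nil hg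
  | cons m t =>
    have hperm := PySem.List.sorted2_perm geo rankA (fun f => f) false
    rw [hs] at hperm
    have hmem : m ∈ geo := hperm.mem_iff.1 List.mem_cons_self
    have hs' : geo.foldl (fun l x => PySem.List.insertBy ltg x l) [] = m :: t := hs
    have hminA : ∀ y ∈ geo, ¬ LtG y m := by
      intro y hy hLt
      have hy' : y ∈ geo.foldl (fun l x => PySem.List.insertBy ltg x l) [] := by
        rw [hs']; exact hperm.mem_iff.2 hy
      have hfalse := head_min_insertBy ltg hirr htrans geo []
        (by intro h hh; simp at hh) m (by rw [hs']; rfl) y hy'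
      have htrue := ltg_iff.2 hLt
      rw [htrue] at hfalse
      simp at hfalse
    obtain ⟨hmemB, hminB⟩ := bestGeoAux_spec geoPreference geo hg
    have hminB' : ∀ y ∈ geo, ¬ LtG y (bestGeo geo) := by
      intro y hy h
      apply hminB y hy
      unfold bestGeo at h
      unfold LtG at h
      rw [← rankL_eq (pyNorm y), ← rankL_eq (pyNorm (bestGeoAux geoPreference geo))] at h
      exact h
    show m = bestGeo geo
    have hmemB' : bestGeo geo ∈ geo := hmemB
    exact LtG_connected (fun h => hminB' m hmem h) (fun h => hminA (bestGeo geo) hmemB' h)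

-- A's normalized_map lookup = first match in the reversed field list
set_option maxHeartbeats 1000000 in
lemma dict_last (l : List String) (k : String) :
    ∀ d : PySem.Dict String String,
      (l.foldl (fun d f => d.insert (pyNorm f) f) d).get? k
        = (l.reverse.find? (fun f => pyNorm f == k)).or (d.get? k) := by
  induction l with
  | nil => intro d; simp
  | cons a l ih =>
    intro d
    simp only [List.foldl_cons, ih, List.reverse_cons, List.find?_append, Option.or_assoc]
    have hz : (d.insert (pyNorm a) a).get? k
        = (List.find? (fun f => pyNorm f == k) [a]).or (d.get? k) := by
      rw [PySem.Dict.get?_insert]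
      simp only [List.find?_cons, List.find?_nil]
      by_cases h : pyNorm a = k
      · simp [h]
      · have h' : ¬ (k = pyNorm a) := fun he => h he.symm
        have hb : (pyNorm a == k) = false := by simp [h]
        simp [hb, h']
    rw [hz]

lemma chooseNamedA_eq (dims : List String) (p : String) :
    chooseNamedA dims [p] = ((lastWithNorm dims (pyNorm p)).getD "") := by
  unfold chooseNamedA lastWithNorm
  rw [chooseNamedAux]
  rw [dict_last dims (pyNorm p) PySem.Dict.empty]
  have hemp : (PySem.Dict.empty : PySem.Dict String String).get? (pyNorm p) = none := PySem.Dict.get?_empty _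
  rw [hemp]
  cases h : dims.reverse.find? (fun f => pyNorm f == pyNorm p) <;> simp [chooseNamedAux]

-- ordered dedup relative to an already-seen list
def ddf (seen : List String) : List String → List String
  | [] => []
  | x :: xs => if x ∈ seen then ddf seen xs else x :: ddf (x :: seen) xs

lemma ddf_congr : ∀ (xs s s' : List String), (∀ x, x ∈ s ↔ x ∈ s') → ddf s xs = ddf s' xs := by
  intro xs
  induction xs with
  | nil => intro s s' h; rfl
  | cons x xs ih =>
    intro s s' h
    by_cases hx : x ∈ s
    · rw [ddf, if_pos hx, ddf, if_pos ((h x).1 hx)]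
      exact ih s s' h
    · rw [ddf, if_neg hx, ddf, if_neg (fun hc => hx ((h x).2 hc))]
      congr 1
      apply ih
      intro z
      simp only [List.mem_cons]
      rw [h z]

lemma ddf_filter_congr : ∀ (xs s s' : List String), (∀ x, x ≠ "" → (x ∈ s ↔ x ∈ s')) →
    (ddf s xs).filter (fun y => y != "") = (ddf s' xs).filter (fun y => y != "") := by
  intro xs
  induction xs with
  | nil => intro s s' h; rfl
  | cons x xs ih =>
    intro s s' h
    by_cases hx : x = ""
    · subst hx
      have key : ∀ (t t' : List String), (∀ z, z ≠ "" → (z ∈ t ↔ z ∈ t')) →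
          (ddf t (("" : String) :: xs)).filter (fun y => y != "")
            = (ddf ("" :: t') xs).filter (fun y => y != "") := by
        intro t t' ht
        by_cases h0 : ("" : String) ∈ t
        · rw [ddf, if_pos h0]
          apply ih
          intro z hz
          rw [ht z hz]
          simp [List.mem_cons, hz]
        · rw [ddf, if_neg h0]
          rw [List.filter_cons]
          simp only [bne_self_eq_false, Bool.false_eq_true, if_false]
          apply ih
          intro z hz
          simp only [List.mem_cons]
          rw [ht z hz]
      rw [key s s' h]
      have := key s' s' (fun z _ => Iff.rfl)
      rw [this]
    · have hx' : x ∈ s ↔ x ∈ s' := h x hx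
      by_cases hm : x ∈ s
      · rw [ddf, if_pos hm, ddf, if_pos (hx'.1 hm)]
        exact ih s s' h
      · rw [ddf, if_neg hm, ddf, if_neg (fun hc => hm (hx'.2 hc))]
        rw [List.filter_cons, List.filter_cons]
        have : (x != "") = true := by simpa using hx
        rw [this]
        simp only [if_true]
        congr 1
        apply ih
        intro z hz
        simp only [List.mem_cons]
        rw [h z hz]

lemma foldl_add_eq_ddf : ∀ (xs s : List String), xs.foldl PySem.Set.add s = s ++ ddf s xs := by
  intro xs
  induction xs with
  | nil => intro s; simp [ddf]
  | cons x xs ih =>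
    intro s
    simp only [List.foldl_cons]
    by_cases hx : x ∈ s
    · have ha : PySem.Set.add s x = s := by
        simp [PySem.Set.add, PySem.Set.contains, hx]
      rw [ha, ih s, ddf, if_pos hx]
    · have ha : PySem.Set.add s x = s ++ [x] := by
        simp [PySem.Set.add, PySem.Set.contains, hx]
      rw [ha, ih (s ++ [x]), ddf, if_neg hx]
      rw [ddf_congr xs (s ++ [x]) (x :: s) (by intro z; simp [or_comm])]
      simp

lemma uniqueStringsA_eq (values : List String) :
    uniqueStringsA values = (PySem.List.dedup (values.map PySem.Str.strip)).filter (fun s => s != "") := by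
  have main : ∀ (l : List String) (seen : PySem.Set String) (res : List String),
      (l.foldl
        (fun (st : PySem.Set String × List String) v =>
          if v = "" then st
          else
            if PySem.Str.strip v ≠ "" ∧ PySem.Set.contains st.1 (PySem.Str.strip v) = false then
              (PySem.Set.add st.1 (PySem.Str.strip v), st.2 ++ [PySem.Str.strip v])
            else st)
        (seen, res)).2 = res ++ (ddf seen (l.map PySem.Str.strip)).filter (fun y => y != "") := by
    intro l
    induction l with
    | nil => intro seen res; simp [ddf]
    | cons v l ih =>
      intro seen res
      have skipCase : ∀ (hv : PySem.Str.strip v = ""),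
          res ++ (ddf seen ((v :: l).map PySem.Str.strip)).filter (fun y => y != "")
            = res ++ (ddf seen (l.map PySem.Str.strip)).filter (fun y => y != "") := by
        intro hv
        congr 1
        simp only [List.map_cons, hv]
        by_cases h0 : ("" : String) ∈ seen
        · rw [ddf, if_pos h0]
        · rw [ddf, if_neg h0, List.filter_cons]
          simp only [bne_self_eq_false, Bool.false_eq_true, if_false]
          exact ddf_filter_congr (l.map PySem.Str.strip) ("" :: seen) seen
            (by intro z hz; simp [List.mem_cons, hz])
      by_cases hv : v = ""
      · subst hv
        simp only [List.foldl_cons, if_true]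
        rw [ih seen res]
        exact (skipCase (by decide)).symm
      · simp only [List.foldl_cons]
        rw [if_neg hv]
        by_cases hc : PySem.Str.strip v = ""
        · rw [if_neg (by rintro ⟨ha, -⟩; exact ha hc), ih seen res]
          exact (skipCase hc).symm
        · by_cases hm : PySem.Str.strip v ∈ seen
          · have hcon : PySem.Set.contains seen (PySem.Str.strip v) = true := by
              simp [PySem.Set.contains, hm]
            rw [if_neg (by rintro ⟨-, hb⟩; rw [hcon] at hb; cases hb), ih seen res]
            congr 2
            simp only [List.map_cons]
            rw [ddf, if_pos hm]
          · have hcon : PySem.Set.contains seen (PySem.Str.strip v) = false := by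
              simp [PySem.Set.contains, hm]
            rw [if_pos ⟨hc, hcon⟩, ih]
            have hadd : PySem.Set.add seen (PySem.Str.strip v) = seen ++ [PySem.Str.strip v] := by
              simp [PySem.Set.add, PySem.Set.contains, hm]
            rw [hadd]
            rw [ddf_congr (l.map PySem.Str.strip) (seen ++ [PySem.Str.strip v]) (PySem.Str.strip v :: seen)
              (by intro z; simp [or_comm])]
            simp only [List.map_cons]
            rw [ddf, if_neg hm, List.filter_cons]
            have hb : (PySem.Str.strip v != "") = true := by simpa using hc
            rw [hb]
            simp
  have hport : uniqueStringsA values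
      = (values.foldl
          (fun (st : PySem.Set String × List String) v =>
            if v = "" then st
            else
              if PySem.Str.strip v ≠ "" ∧ PySem.Set.contains st.1 (PySem.Str.strip v) = false then
                (PySem.Set.add st.1 (PySem.Str.strip v), st.2 ++ [PySem.Str.strip v])
              else st)
          (PySem.Set.empty, [])).2 := rfl
  rw [hport, main values PySem.Set.empty []]
  rw [PySem.List.dedup_eq_ofList, PySem.Set.ofList_eq_foldl, foldl_add_eq_ddf]
  simp [PySem.Set.empty]

-- date helper in getD form
lemma chooseDateA_eq (d : PySem.Dict String (List String)) :
    chooseDateA d "" = (match d.getD "date_fields" [] with | [] => "" | x :: _ => x) := by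
  unfold chooseDateA
  rw [PySem.Dict.getD_eq_get?_getD]
  cases d.get? "date_fields" with
  | none => rfl
  | some l => cases l <;> rfl

-- geo helper in bestGeo form
lemma chooseGeoA_eq (d : PySem.Dict String (List String)) :
    chooseGeoA d "" = (if d.getD "geo_fields" [] = [] then "" else bestGeo (d.getD "geo_fields" [])) := by
  unfold chooseGeoA
  by_cases h : d.getD "geo_fields" [] = []
  · simp [h]
  · simp only [h, if_false]
    exact geo_head_eq _ h

lemma pyNorm_empty : pyNorm "" = "" := by decide

-- one step of the Category/Sub-Category/Segment loop
lemma step_named (dims : List String) (p t : String) (hpt : pyNorm p = t) (ht : t ≠ "") (acc : List String) :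
    (if chooseNamedA dims [p] ≠ "" then acc ++ [chooseNamedA dims [p]] else acc)
      = (match lastWithNorm dims t with | some f => acc ++ [f] | none => acc) := by
  rw [chooseNamedA_eq, hpt]
  cases h : lastWithNorm dims t with
  | none => simp
  | some f =>
    have hf : pyNorm f = t := by
      unfold lastWithNorm at h
      have := List.find?_some h
      exact eq_of_beq this
    have hne : f ≠ "" := by
      intro he
      rw [he, pyNorm_empty] at hf
      exact ht hf.symm
    simp [hne]

lemma final_if (X Y : List String) : (if X = [] then X ++ Y else X) = (if X = [] then Y else X) := by
  by_cases h : X = [] <;> simp [h]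

theorem suggest_filters_py_spec : Claim_equal_suggest_filters_py := by
  intro fc _ _
  show suggest_filters_py fc = suggest_filters_py_alt fc
  unfold suggest_filters_py suggest_filters_py_alt
  rw [uniqueStringsA_eq]
  simp only [List.foldl_cons, List.foldl_nil]
  rw [chooseDateA_eq, chooseGeoA_eq]
  rw [step_named _ "Category" "category" (by decide) (by decide)]
  rw [step_named _ "Sub-Category" "sub category" (by decide) (by decide)]
  rw [step_named _ "Segment" "segment" (by decide) (by decide)]
  set d := PySem.Dict.ofList fc
  congr 2
  cases hdf : d.getD "date_fields" [] with
  | nil =>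
    by_cases hg : d.getD "geo_fields" [] = [] <;> simp [hg, final_if]
  | cons x xs =>
    by_cases hg : d.getD "geo_fields" [] = [] <;> simp [hg, final_if]
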